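-- pv_equiv track=rewrite | github.com/sylvesterakrong/comickids_backend | comickids_backend/core/utils.py | extract_panel_dialogues
-- ===== SOURCE A (Python) =====
-- def extract_panel_dialogues(script: str) -> list[str]:
--     dialogues = []
--     current_dialogue = ""
--     for line in script.splitlines():
--         if "panel" in line.lower():
--             if current_dialogue:
--                 dialogues.append(current_dialogue.strip())
--             current_dialogue = ""
--         elif "dialogue" in line.lower():
--             # Handles Dialogue: or - Dialogue:
--             parts = line.split(":", 1)
--             if len(parts) > 1:
--                 current_dialogue = parts[1].strip().strip('"')
--             else:
--                 current_dialogue = ""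
--     if current_dialogue:
--         dialogues.append(current_dialogue.strip())
--     return dialogues
-- ===== SOURCE B (Python) =====
-- def extract_panel_dialogues(script: str) -> list[str]:
--     # Group lines into segments split at panel lines, then take each
--     # segment's last dialogue line's value.
--     segments = [[]]
--     for line in script.splitlines():
--         if "panel" in line.lower():
--             segments.append([])
--         else:
--             segments[-1].append(line)
--     result = []
--     for seg in segments:
--         val = ""
--         for line in reversed(seg):
--             if "dialogue" in line.lower():
--                 parts = line.split(":", 1)
--                 val = parts[1].strip().strip('"') if len(parts) > 1 else ""
--                 break
--         if val:
--             result.append(val.strip())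
--     return result
-- ===== Notes on version B (the rewrite author's own statement) =====
-- stated objective: alternative
-- what changed: Replaces A's single-pass state machine (carrying the pending dialogue string and flushing it at each panel line) by an explicit group-then-extract pass: lines are partitioned into segments at panel lines, then each segment's last dialogue line is parsed and appended if non-empty.
import Mathlib
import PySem

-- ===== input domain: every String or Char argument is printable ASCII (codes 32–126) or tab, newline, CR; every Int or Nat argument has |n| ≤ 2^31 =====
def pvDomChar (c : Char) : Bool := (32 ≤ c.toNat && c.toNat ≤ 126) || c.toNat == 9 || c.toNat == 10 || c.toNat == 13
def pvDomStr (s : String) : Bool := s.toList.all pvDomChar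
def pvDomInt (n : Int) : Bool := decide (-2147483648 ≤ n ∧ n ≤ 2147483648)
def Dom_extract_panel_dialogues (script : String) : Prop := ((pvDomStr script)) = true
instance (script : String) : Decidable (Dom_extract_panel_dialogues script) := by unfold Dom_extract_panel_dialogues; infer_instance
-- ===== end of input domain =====

-- B replaces A's one-pass flush-at-panel state machine by a group-at-panels-then-take-last-dialogue pass (alternative decomposition, same cost).

-- shared line-level helpers (identical code in both Pythons)
def pvIsPanel (line : String) : Bool := PySem.Str.isIn "panel" (PySem.Str.lower line)
def pvIsDial (line : String) : Bool := PySem.Str.isIn "dialogue" (PySem.Str.lower line)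
-- line.split(":", 1); if len(parts) > 1: parts[1].strip().strip('"') else ""
def pvVal (line : String) : String :=
  match PySem.Str.splitMax? line ":" 1 with
  | some (_ :: p1 :: _) => PySem.Str.stripChars (PySem.Str.strip p1) "\""
  | _ => ""

-- ===== PORT A =====
-- A's loop: state = (dialogues so far, current_dialogue)
def pvLoopA : List String → List String → String → List String
  | [], ds, cur => if cur ≠ "" then ds ++ [PySem.Str.strip cur] else ds
  | l :: rest, ds, cur =>
      if pvIsPanel l then
        pvLoopA rest (if cur ≠ "" then ds ++ [PySem.Str.strip cur] else ds) ""
      else if pvIsDial l then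
        pvLoopA rest ds (pvVal l)
      else
        pvLoopA rest ds cur

def extract_panel_dialogues (script : String) : List String :=
  pvLoopA (PySem.Str.splitlines script) [] ""

-- ===== PORT B =====
-- Source B's segment builder: state = (done segments, current segment); panel lines close the current segment
def pvSegLoop : List String → List (List String) → List String → List (List String)
  | [], done, cur => done ++ [cur]
  | l :: rest, done, cur =>
      if pvIsPanel l then pvSegLoop rest (done ++ [cur]) []
      else pvSegLoop rest done (cur ++ [l])

-- Source B's 'for line in reversed(seg): … break': first dialogue line of the reversed segment
def pvFindDial : List String → String
  | [] => ""
  | l :: rest => if pvIsDial l then pvVal l else pvFindDial rest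

def pvEmit (acc : List String) (seg : List String) : List String :=
  let v := pvFindDial seg.reverse
  if v ≠ "" then acc ++ [PySem.Str.strip v] else acc

def extract_panel_dialogues_alt (script : String) : List String :=
  (pvSegLoop (PySem.Str.splitlines script) [] []).foldl pvEmit []

-- ===== PRECONDITION & SPEC =====
def Spec_extract_panel_dialogues (script : String) (out : List String) : Prop := out = extract_panel_dialogues_alt script
instance (script : String) (out : List String) : Decidable (Spec_extract_panel_dialogues script out) := by unfold Spec_extract_panel_dialogues; infer_instance

-- ===== CLAIM (what is proved, stated in full; the proofs are below) =====
def Claim_equal_extract_panel_dialogues : Prop := ∀ (script : String), Dom_extract_panel_dialogues script → Spec_extract_panel_dialogues script (extract_panel_dialogues script)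

-- ===== LEMMAS AND PROOFS =====

-- completed segments pass straight through the segment builder
theorem pvSegLoop_done (lines : List String) (done : List (List String)) (cur : List String) :
    pvSegLoop lines done cur = done ++ pvSegLoop lines [] cur := by
  induction lines generalizing done cur with
  | nil => simp [pvSegLoop]
  | cons l rest ih =>
      simp only [pvSegLoop]
      split
      · rw [ih (done ++ [cur]) [], ih ([] ++ [cur]) []]; simp
      · exact ih done (cur ++ [l])

-- main invariant: A's loop from (ds, cur) equals folding pvEmit over the remaining segments,
-- provided cur is exactly the last dialogue value of the open segment curSeg
theorem pvLoopA_eq_fold (lines : List String) (ds : List String) (cur : String)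
    (curSeg : List String) (h : pvFindDial curSeg.reverse = cur) :
    pvLoopA lines ds cur = (pvSegLoop lines [] curSeg).foldl pvEmit ds := by
  induction lines generalizing ds cur curSeg with
  | nil =>
      simp [pvLoopA, pvSegLoop, pvEmit, h]
  | cons l rest ih =>
      simp only [pvLoopA, pvSegLoop]
      split
      · rw [pvSegLoop_done rest ([] ++ [curSeg]) []]; simp only [List.nil_append, List.foldl_append]
        rw [ih _ "" [] rfl]
        simp [pvEmit, h]
      · next hp =>
        split
        · next hd =>
          apply ih
          simp [pvFindDial, hd]
        · next hd =>
          apply ih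
          simp only [List.reverse_append, List.reverse_singleton, List.singleton_append,
            pvFindDial]
          simp only [Bool.not_eq_true] at hd
          simp [hd, h]

-- ===== VERDICT (by name: the statement is the Claim_ definition above) =====
theorem extract_panel_dialogues_spec : Claim_equal_extract_panel_dialogues := by
  intro script _
  unfold Spec_extract_panel_dialogues extract_panel_dialogues extract_panel_dialogues_alt
  exact pvLoopA_eq_fold _ [] "" [] rfl
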